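-- pv_equiv track=rewrite | github.com/weed478/wdi6 | zad15.py | stairs_placement
-- ===== SOURCE A (Python) =====
-- def stairs_placement(n):
--     p = [0] * n
--     c = 0
--     for r in range(n):
--         p[r] = c
--         c += n + 2
--         c %= n
--
--     return p
-- ===== SOURCE B (Python) =====
-- def stairs_placement(n):
--     # closed form: the r-th placement is (2*r) % n; no running modular accumulator
--     p = []
--     for r in range(n):
--         p.append(2 * r % n)
--     return p
-- ===== Notes on version B (the rewrite author's own statement) =====
-- stated objective: simpler
-- what changed: Replaces A's threaded modular accumulator c (updated by c = (c+n+2) % n each step) and in-place writes into a preallocated list with a stateless loop appending the closed form (2*r) % n for each index.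
import Mathlib
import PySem

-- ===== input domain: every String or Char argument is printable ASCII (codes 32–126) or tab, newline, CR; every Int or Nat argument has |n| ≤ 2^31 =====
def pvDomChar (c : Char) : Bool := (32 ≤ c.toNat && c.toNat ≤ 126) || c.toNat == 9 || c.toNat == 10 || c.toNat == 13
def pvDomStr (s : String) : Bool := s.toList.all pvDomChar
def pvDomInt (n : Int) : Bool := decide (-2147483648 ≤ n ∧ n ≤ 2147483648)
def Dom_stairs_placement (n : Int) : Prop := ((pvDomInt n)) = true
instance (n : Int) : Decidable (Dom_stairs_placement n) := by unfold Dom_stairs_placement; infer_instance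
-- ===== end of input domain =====

-- B drops A's running modular accumulator and appends the closed form (2*r) % n per index (objective: simpler).


-- ===== PORT A =====
-- p = [0]*n; c = 0; for r in range(n): p[r] = c; c += n + 2; c %= n; return p
def stairs_placement (n : Int) : List Int :=
  let p : List Int := List.replicate n.toNat 0
  let st := (PySem.List.pyRange 0 n).foldl
    (fun (st : List Int × Int) r =>
      let p := PySem.List.pySetD st.1 r st.2
      let c := st.2 + n + 2
      let c := PySem.Int.mod c n
      (p, c)) (p, 0)
  st.1

-- ===== PORT B =====
-- p = []; for r in range(n): p.append(2 * r % n); return p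
def stairs_placement_alt (n : Int) : List Int :=
  (PySem.List.pyRange 0 n).foldl
    (fun p r => p ++ [PySem.Int.mod (2 * r) n]) []

-- ===== PRECONDITION & SPEC =====
def Spec_stairs_placement (n : Int) (out : List Int) : Prop := out = stairs_placement_alt n
instance (n : Int) (out : List Int) : Decidable (Spec_stairs_placement n out) := by unfold Spec_stairs_placement; infer_instance

-- ===== CLAIM (what is proved, stated in full; the proofs are below) =====
def Claim_equal_stairs_placement : Prop := ∀ (n : Int), Dom_stairs_placement n → Spec_stairs_placement n (stairs_placement n)

-- ===== LEMMAS AND PROOFS =====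

-- B's loop is the map of the closed form over the range
theorem alt_eq_map (n : Int) :
    stairs_placement_alt n = (PySem.List.pyRange 0 n).map (fun r => PySem.Int.mod (2 * r) n) := by
  unfold stairs_placement_alt
  simpa using PySem.List.foldl_append_singleton_eq_map (fun r => PySem.Int.mod (2 * r) n) _ []

-- A's loop invariant: after the first k iterations the list is the mapped prefix plus
-- the untouched zero tail, and the accumulator equals (2*k) % n.
theorem a_invariant (m : Nat) (hm : 0 < m) (k : Nat) (hk : k ≤ m) :
    (List.range k).foldl
      (fun (st : List Int × Int) (j : Nat) =>
        (PySem.List.pySetD st.1 (j : Int) st.2,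
         PySem.Int.mod (st.2 + (m : Int) + 2) (m : Int)))
      (List.replicate m (0 : Int), 0)
    = ((List.range k).map (fun j : Nat => PySem.Int.mod (2 * (j : Int)) (m : Int))
         ++ List.replicate (m - k) (0 : Int),
       PySem.Int.mod (2 * (k : Int)) (m : Int)) := by
  have hmpos : (0 : Int) < (m : Int) := by exact_mod_cast hm
  induction k with
  | zero =>
      simp [PySem.Int.mod_eq_emod_of_pos hmpos]
  | succ k ih =>
      have hk' : k ≤ m := Nat.le_of_succ_le hk
      have hklt : k < m := hk
      rw [List.range_succ, List.foldl_append, ih hk']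
      simp only [List.foldl_cons, List.foldl_nil, PySem.List.pySetD_natCast, Prod.mk.injEq]
      refine ⟨?_, ?_⟩
      · rw [show List.replicate (m - k) (0 : Int) = 0 :: List.replicate (m - k - 1) 0 from by
          rw [← List.replicate_succ]; congr 1; omega]
        rw [List.set_append_right _ _ (by simp)]
        simp
        omega
      · rw [PySem.Int.mod_eq_emod_of_pos hmpos, PySem.Int.mod_eq_emod_of_pos hmpos,
            PySem.Int.mod_eq_emod_of_pos hmpos]
        push_cast
        rw [show (2:Int) * ((k:Int)+1) = 2*(k:Int) + 2 from by ring, add_assoc, Int.emod_add_emod,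
            show (2*(k:Int) + ((m:Int)+2)) = (2*(k:Int)+2) + (m:Int)*1 from by ring,
            Int.add_mul_emod_self_left]

-- ===== VERDICT (by name: the statement is the Claim_ definition above) =====
theorem stairs_placement_spec : Claim_equal_stairs_placement := by
  intro n _
  unfold Spec_stairs_placement
  rw [alt_eq_map]
  unfold stairs_placement
  by_cases hn : 0 < n
  · obtain ⟨m, rfl⟩ : ∃ m : Nat, n = (m : Int) := ⟨n.toNat, by omega⟩
    have hm : 0 < m := by exact_mod_cast hn
    rw [PySem.List.pyRange_zero_natCast]
    simp only [Int.toNat_natCast, List.foldl_map]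
    rw [a_invariant m hm m (le_refl m)]
    simp [List.map_map, Function.comp]
  · have hr : PySem.List.pyRange 0 n = [] := by
      simp [PySem.List.pyRange, if_neg hn]
    simp [hr, show n.toNat = 0 by omega]
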